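-- pv_equiv track=rewrite | github.com/nbatho/Python_PE | PY01027 - So loc phat dep.py | check
-- ===== SOURCE A (Python) =====
-- def check(s):
--     if s[0] != "6": return "NO"
--     cnt = 0
--     for i in range(len(s)):
--         if s[i] != "6" and s[i] != "8" : return "NO"
--         if (s[i] == "8"): cnt += 1
--         else: cnt =0
--         if cnt >= 3: return "NO"
--     return "YES"
-- ===== SOURCE B (Python) =====
-- def check(s):
--     if s[0] != "6":
--         return "NO"
--     if all(c in "68" for c in s) and "888" not in s:
--         return "YES"
--     return "NO"
-- ===== Notes on version B (the rewrite author's own statement) =====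
-- stated objective: simpler
-- what changed: Replaces the stateful loop with its running consecutive-8 counter by two whole-string tests: an all(c in "68") membership check plus a "888" substring search.
import Mathlib
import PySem

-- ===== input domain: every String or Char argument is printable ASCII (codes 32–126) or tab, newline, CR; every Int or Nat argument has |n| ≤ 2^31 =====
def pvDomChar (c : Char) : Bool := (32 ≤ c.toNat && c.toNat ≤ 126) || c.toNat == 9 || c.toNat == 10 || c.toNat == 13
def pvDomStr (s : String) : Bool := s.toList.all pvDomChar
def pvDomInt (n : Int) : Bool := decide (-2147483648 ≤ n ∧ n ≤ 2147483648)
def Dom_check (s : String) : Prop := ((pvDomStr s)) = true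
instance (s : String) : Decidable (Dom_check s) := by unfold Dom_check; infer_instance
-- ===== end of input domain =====

-- B replaces A's running consecutive-8 counter by an all-chars-in-"68" test plus a "888" substring search (objective: simpler).


-- ===== PORT A =====
-- the for-loop over range(len(s)) with the running counter cnt, early returns included
def checkLoop : List Char → Int → String
  | [], _ => "YES"
  | c :: rest, cnt =>
    if c ≠ '6' ∧ c ≠ '8' then "NO"
    else if (if c = '8' then cnt + 1 else 0) ≥ 3 then "NO"
    else checkLoop rest (if c = '8' then cnt + 1 else 0)

def check (s : String) : String :=
  match PySem.Str.pyGet? s 0 with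
  | none => "NO"   -- s[0] raises IndexError in Python; excluded by Pre_check
  | some c => if c ≠ '6' then "NO" else checkLoop s.toList 0

-- ===== PORT B =====
-- hand port of Python's '"888" in s' (three-char substring scan); exact: true iff "888" occurs in the string
def has888 : List Char → Bool
  | c1 :: c2 :: c3 :: rest => (c1 == '8' && c2 == '8' && c3 == '8') || has888 (c2 :: c3 :: rest)
  | _ => false

def check_alt (s : String) : String :=
  match PySem.Str.pyGet? s 0 with
  | none => "NO"   -- s[0] raises IndexError in Python; excluded by Pre_check
  | some c =>
    if c ≠ '6' then "NO"
    else if s.toList.all (fun ch => ch == '6' || ch == '8') && !has888 s.toList then "YES"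
    else "NO"

-- ===== PRECONDITION & SPEC =====
-- Pre_ excludes only the empty string, on which A's s[0] raises IndexError (B raises there too).
def Pre_check (s : String) : Prop := s.toList ≠ []
instance (s : String) : Decidable (Pre_check s) := by unfold Pre_check; infer_instance
def pvWitness_check : String := "688"
def Spec_check (s : String) (out : String) : Prop := out = check_alt s
instance (s : String) (out : String) : Decidable (Spec_check s out) := by unfold Spec_check; infer_instance

-- ===== CLAIM (what is proved, stated in full; the proofs are below) =====
def Claim_equal_check : Prop := ∀ (s : String), Dom_check s → Pre_check s → Spec_check s (check s)

-- ===== LEMMAS AND PROOFS =====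

-- number of leading '8' characters
def lead8 : List Char → Nat
  | [] => 0
  | c :: rest => if c = '8' then lead8 rest + 1 else 0

lemma checkLoop_cons8 (rest : List Char) (cnt : Int) :
    checkLoop ('8' :: rest) cnt = if cnt + 1 ≥ 3 then "NO" else checkLoop rest (cnt + 1) := by
  norm_num [checkLoop]

lemma checkLoop_cons6 (rest : List Char) (cnt : Int) :
    checkLoop ('6' :: rest) cnt = checkLoop rest 0 := by
  have h : ('6' : Char) = '8' ↔ False := by simp
  simp [checkLoop, h]

lemma checkLoop_cons_bad (c : Char) (rest : List Char) (cnt : Int)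
    (h6 : c ≠ '6') (h8 : c ≠ '8') : checkLoop (c :: rest) cnt = "NO" := by
  simp [checkLoop, h6, h8]

lemma has888_cons_ne (c : Char) (h : c ≠ '8') (rest : List Char) :
    has888 (c :: rest) = has888 rest := by
  match rest with
  | [] => simp [has888]
  | [d] => simp [has888]
  | d :: e :: t => simp [has888, h]

lemma has888_cons8 (rest : List Char) :
    has888 ('8' :: rest) = (decide (2 ≤ lead8 rest) || has888 rest) := by
  match rest with
  | [] => simp [has888, lead8]
  | [d] => by_cases hd : d = '8' <;> simp [has888, lead8, hd]
  | d :: e :: t =>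
    by_cases hd : d = '8' <;> by_cases he : e = '8' <;>
      simp [has888, lead8, hd, he]

lemma lead8_le2 (l : List Char) (h : has888 l = false) : lead8 l ≤ 2 := by
  match l with
  | [] => simp [lead8]
  | c :: rest =>
    by_cases hc : c = '8'
    · subst hc
      rw [has888_cons8] at h
      simp only [Bool.or_eq_false_iff, decide_eq_false_iff_not] at h
      simp [lead8]
      omega
    · simp [lead8, hc]

lemma checkLoop_no (l : List Char) : ∀ cnt : Int,
    checkLoop l cnt = "YES" ∨ checkLoop l cnt = "NO" := by
  induction l with
  | nil => intro cnt; left; rfl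
  | cons c rest ih =>
    intro cnt
    by_cases h6 : c = '6'
    · subst h6; rw [checkLoop_cons6]; exact ih 0
    · by_cases h8 : c = '8'
      · subst h8
        rw [checkLoop_cons8]
        split_ifs
        · right; rfl
        · exact ih _
      · right; exact checkLoop_cons_bad c rest cnt h6 h8

lemma checkLoop_yes (l : List Char) : ∀ cnt : Int, 0 ≤ cnt → cnt < 3 →
    (checkLoop l cnt = "YES" ↔
      ((∀ c ∈ l, c = '6' ∨ c = '8') ∧ has888 l = false ∧ cnt + (lead8 l : Int) < 3)) := by
  induction l with
  | nil =>
    intro cnt h0 h3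
    constructor
    · intro _
      refine ⟨by simp, by simp [has888], ?_⟩
      simp only [lead8, Nat.cast_zero]
      omega
    · intro _; rfl
  | cons c rest ih =>
    intro cnt h0 h3
    by_cases hc8 : c = '8'
    · subst hc8
      by_cases hge : cnt + 1 ≥ 3
      · rw [checkLoop_cons8, if_pos hge]
        constructor
        · intro h; exact absurd h (by decide)
        · rintro ⟨-, -, hlt⟩
          exfalso
          have h1 : 1 ≤ lead8 ('8' :: rest) := by simp [lead8]
          omega
      · rw [checkLoop_cons8, if_neg hge, ih (cnt + 1) (by omega) (by omega)]
        have hl8 : lead8 ('8' :: rest) = lead8 rest + 1 := by simp [lead8]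
        constructor
        · rintro ⟨hall, h8, hlt⟩
          refine ⟨?_, ?_, ?_⟩
          · intro x hx
            rcases List.mem_cons.mp hx with h | h
            · exact Or.inr (by simp [h])
            · exact hall x h
          · rw [has888_cons8]
            simp only [Bool.or_eq_false_iff, decide_eq_false_iff_not]
            exact ⟨by omega, h8⟩
          · rw [hl8]; push_cast; omega
        · rintro ⟨hall, h8, hlt⟩
          rw [has888_cons8] at h8
          simp only [Bool.or_eq_false_iff, decide_eq_false_iff_not] at h8
          refine ⟨fun x hx => hall x (List.mem_cons_of_mem _ hx), h8.2, ?_⟩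
          rw [hl8] at hlt; push_cast at hlt; omega
    · by_cases hc6 : c = '6'
      · subst hc6
        rw [checkLoop_cons6, ih 0 (by omega) (by omega)]
        have h88 : has888 ('6' :: rest) = has888 rest := has888_cons_ne '6' (by decide) rest
        have hl6 : lead8 ('6' :: rest) = 0 := by simp [lead8]
        constructor
        · rintro ⟨hall, h8, -⟩
          refine ⟨?_, by rw [h88]; exact h8, by rw [hl6]; push_cast; omega⟩
          intro x hx
          rcases List.mem_cons.mp hx with h | h
          · exact Or.inl (by simp [h])
          · exact hall x h
        · rintro ⟨hall, h8, -⟩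
          have h8' : has888 rest = false := by rw [h88] at h8; exact h8
          refine ⟨fun x hx => hall x (List.mem_cons_of_mem _ hx), h8', ?_⟩
          have := lead8_le2 rest h8'
          omega
      · rw [checkLoop_cons_bad c rest cnt hc6 hc8]
        constructor
        · intro h; exact absurd h (by decide)
        · rintro ⟨hall, -, -⟩
          exfalso
          rcases hall c (by simp) with h | h
          · exact hc6 h
          · exact hc8 h

-- ===== VERDICT (by name: the statement is the Claim_ definition above) =====
theorem check_spec : Claim_equal_check := by
  intro s _ hpre
  unfold Spec_check
  rcases hl : s.toList with _ | ⟨a, t⟩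
  · exact absurd hl hpre
  · have hget : PySem.Str.pyGet? s 0 = some a := by
      simp [hl, PySem.List.pyGet?, PySem.List.pyIdx?]
    simp only [check, check_alt, hget, hl]
    by_cases hc : a = '6'
    · subst hc
      have hni : ¬('6' ≠ '6') := by simp
      rw [if_neg hni, if_neg hni]
      by_cases hC : ((('6' :: t).all fun ch => ch == '6' || ch == '8') && !has888 ('6' :: t)) = true
      · rw [if_pos hC]
        apply (checkLoop_yes ('6' :: t) 0 (by omega) (by omega)).mpr
        simp only [Bool.and_eq_true, Bool.not_eq_true', List.all_eq_true] at hC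
        refine ⟨?_, hC.2, ?_⟩
        · intro x hx
          have := hC.1 x hx
          simpa using this
        · have hl6 : lead8 ('6' :: t) = 0 := by simp [lead8]
          rw [hl6]; norm_num
      · rw [if_neg hC]
        rcases checkLoop_no ('6' :: t) 0 with h | h
        · exfalso
          obtain ⟨hall, h8, -⟩ := (checkLoop_yes ('6' :: t) 0 (by omega) (by omega)).mp h
          apply hC
          simp only [Bool.and_eq_true, Bool.not_eq_true', List.all_eq_true]
          exact ⟨fun x hx => by rcases hall x hx with h' | h' <;> simp [h'], h8⟩
        · exact h
    · rw [if_pos hc, if_pos hc]
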